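-- pv_equiv track=rewrite | github.com/germanrud/python-algo-1 | practica8.py | cuantas_veces_aparece_un_string
-- ===== SOURCE A (Python) =====
-- def coinciden_los_str(s1:str, s2:str) -> bool:
--     estado = True
--     for i in range(len(s1)):
--         if s1[i]!=s2[i]:
--             estado = False
--     return estado
--
-- def cuantas_veces_aparece_un_string(frase:str, palabra:str) -> int: #es un problema complejo el que resolvi, pero no pedian esto
--     contador:int = 0
--     palabra_posta = " " + palabra + " "
--     palabra_posta2 = " " + palabra + "\n" #esta es por si termina con un salto de pagina o sea si una linea justo termina con moo
--     longitud_palabra:int = len(palabra_posta)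
--     for i in range(len(frase)-longitud_palabra+1):
--         if frase[i] == palabra_posta[0]:
--             cont_aux:int = 0
--             cont_siosi:int = 0
--             while cont_siosi<longitud_palabra:
--                 if frase[i+cont_aux] == palabra_posta[cont_aux] or frase[i+cont_aux] == palabra_posta2[cont_aux]:
--                     cont_aux = cont_aux + 1
--                 if cont_aux == longitud_palabra:
--                     contador = contador + 1
--                 cont_siosi = cont_siosi + 1
--     if coinciden_los_str(quedarme_con_str_desde_hasta(frase,0,len(palabra)), palabra):
--         contador += 1
--     if coinciden_los_str(quedarme_con_str_desde_hasta(frase,len(frase)-len(palabra),len(frase)), palabra):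
--         contador += 1
--     return contador
--
-- def quedarme_con_str_desde_hasta(s:str, desde:int, hasta:int) -> str:
--     frase_nueva = ""
--     for i in range(desde,hasta):
--         frase_nueva = frase_nueva + s[i]
--     return frase_nueva
-- ===== SOURCE B (Python) =====
-- # B: jump between occurrences with str.find instead of testing every position with a char-by-char while loop.
-- def cuantas_veces_aparece_un_string(frase: str, palabra: str) -> int:
--     total = 0
--     for pat in (" " + palabra + " ", " " + palabra + "\n"):
--         pos = frase.find(pat)
--         while pos != -1:
--             total += 1
--             pos = frase.find(pat, pos + 1)
--     if frase.startswith(palabra):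
--         total += 1
--     if frase.endswith(palabra):
--         total += 1
--     return total
-- ===== Notes on version B (the rewrite author's own statement) =====
-- stated objective: faster
-- what changed: A tests every position with a char-by-char stalling while-loop against two padded patterns and rebuilds endpoint substrings character by character; B jumps between occurrences with str.find (restarting at pos+1 to keep overlaps) and uses startswith/endswith for the endpoints.
import Mathlib
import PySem

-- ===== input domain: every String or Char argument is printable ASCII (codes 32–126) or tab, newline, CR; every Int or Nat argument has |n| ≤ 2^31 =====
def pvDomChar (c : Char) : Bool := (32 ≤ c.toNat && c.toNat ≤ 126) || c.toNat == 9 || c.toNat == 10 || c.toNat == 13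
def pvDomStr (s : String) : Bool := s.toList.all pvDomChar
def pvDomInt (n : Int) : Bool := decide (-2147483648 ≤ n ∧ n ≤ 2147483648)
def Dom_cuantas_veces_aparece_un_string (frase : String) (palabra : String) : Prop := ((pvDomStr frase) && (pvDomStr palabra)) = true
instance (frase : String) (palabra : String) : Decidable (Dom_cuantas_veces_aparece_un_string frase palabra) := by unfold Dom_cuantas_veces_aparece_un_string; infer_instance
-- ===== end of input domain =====

-- B replaces A's test-every-position char-by-char while-loop with find-based jumps between
-- occurrences plus startswith/endswith for the endpoints (objective: faster, constant-factor).

-- ===== PORT A =====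
-- quedarme_con_str_desde_hasta: builds the substring character by character (exact under Pre_,
-- where every index visited is in range, so pyGetD's default is never read)
def pvSubstr (s : List Char) (desde hasta : Int) : List Char :=
  (PySem.List.pyRange desde hasta 1).foldl (fun acc i => acc ++ [PySem.List.pyGetD s i ' ']) []

-- coinciden_los_str (exact under Pre_: s2 is always at least as long as s1 at the call sites)
def pvCoinciden (s1 s2 : List Char) : Bool :=
  (PySem.List.pyRange 0 (s1.length : Int) 1).foldl
    (fun estado i => if PySem.List.pyGetD s1 i ' ' ≠ PySem.List.pyGetD s2 i ' ' then false else estado)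
    true

-- the inner `while cont_siosi < longitud_palabra` loop, state passed along
def pvInnerA (s posta posta2 : List Char) (L i : Int) (cont_siosi cont_aux contador : Int) : Int :=
  if h : cont_siosi < L then
    let cont_aux' :=
      if PySem.List.pyGetD s (i + cont_aux) ' ' = PySem.List.pyGetD posta cont_aux ' ' ∨
         PySem.List.pyGetD s (i + cont_aux) ' ' = PySem.List.pyGetD posta2 cont_aux ' ' then
        cont_aux + 1
      else cont_aux
    let contador' := if cont_aux' = L then contador + 1 else contador
    pvInnerA s posta posta2 L i (cont_siosi + 1) cont_aux' contador'
  else contador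
termination_by (L - cont_siosi).toNat
decreasing_by omega

def cuantas_veces_aparece_un_string (frase : String) (palabra : String) : Int :=
  let s := frase.toList
  let w := palabra.toList
  let posta : List Char := ' ' :: (w ++ [' '])
  let posta2 : List Char := ' ' :: (w ++ ['\n'])
  let L : Int := (posta.length : Int)
  let contador :=
    (PySem.List.pyRange 0 ((s.length : Int) - L + 1) 1).foldl
      (fun contador i =>
        if PySem.List.pyGetD s i ' ' = PySem.List.pyGetD posta 0 ' ' then
          pvInnerA s posta posta2 L i 0 0 contador
        else contador)
      0
  let contador := if pvCoinciden (pvSubstr s 0 (w.length : Int)) w then contador + 1 else contador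
  let contador := if pvCoinciden (pvSubstr s ((s.length : Int) - (w.length : Int)) (s.length : Int)) w
                  then contador + 1 else contador
  contador

-- ===== PORT B =====
-- the `pos = frase.find(pat); while pos != -1: total += 1; pos = frase.find(pat, pos+1)` loop
-- (the `start ≤ s.length` test only justifies termination: past the end find returns -1 anyway)
def pvCountFind (s pat : List Char) (start : Nat) (total : Int) : Int :=
  if hs : start ≤ s.length then
    let pos := PySem.Chars.findFrom s pat (start : Int) none
    if h : pos = -1 then total
    else pvCountFind s pat (pos.toNat + 1) (total + 1)
  else total
termination_by s.length + 1 - start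
decreasing_by
  have hspec := PySem.Chars.findFrom_natCast_spec s pat start hs h
  have _hub : PySem.Chars.findFrom s pat (start : Int) none ≤ (s.length : Int) := by
    rw [PySem.Chars.findFrom_natCast s pat start hs]
    have := PySem.Chars.find_le_length (List.drop start s) pat
    simp only [List.length_drop] at this
    split <;> omega
  omega

def cuantas_veces_aparece_un_string_alt (frase : String) (palabra : String) : Int :=
  let s := frase.toList
  let w := palabra.toList
  let total :=
    [(' ' :: (w ++ [' '])), (' ' :: (w ++ ['\n']))].foldl
      (fun total pat => pvCountFind s pat 0 total) 0
  let total := if PySem.Chars.startswith s w then total + 1 else total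
  let total := if PySem.Chars.endswith s w then total + 1 else total
  total

-- ===== PRECONDITION & SPEC =====
-- A raises IndexError (in quedarme_con_str_desde_hasta) exactly when palabra is longer than frase.
def Pre_cuantas_veces_aparece_un_string (frase : String) (palabra : String) : Prop :=
  palabra.toList.length ≤ frase.toList.length
instance (frase : String) (palabra : String) : Decidable (Pre_cuantas_veces_aparece_un_string frase palabra) := by
  unfold Pre_cuantas_veces_aparece_un_string; infer_instance

def pvWitness_cuantas_veces_aparece_un_string : String × String := ("a b a", "b")

def Spec_cuantas_veces_aparece_un_string (frase : String) (palabra : String) (out : Int) : Prop := out = cuantas_veces_aparece_un_string_alt frase palabra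
instance (frase : String) (palabra : String) (out : Int) : Decidable (Spec_cuantas_veces_aparece_un_string frase palabra out) := by unfold Spec_cuantas_veces_aparece_un_string; infer_instance

-- ===== CLAIM (what is proved, stated in full; the proofs are below) =====
def Claim_equal_cuantas_veces_aparece_un_string : Prop := ∀ (frase : String) (palabra : String), Dom_cuantas_veces_aparece_un_string frase palabra → Pre_cuantas_veces_aparece_un_string frase palabra → Spec_cuantas_veces_aparece_un_string frase palabra (cuantas_veces_aparece_un_string frase palabra)

-- ===== LEMMAS AND PROOFS =====

-- the number of positions of s at which pat occurs (the common yardstick both counts reduce to)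
def pvCnt (s pat : List Char) : Nat :=
  (List.range (s.length + 1)).countP (fun j => pat.isPrefixOf (List.drop j s))

lemma pv_count_split (s pat : List Char) (start p : Nat) (hp : p ≤ s.length)
    (hsp : start ≤ p) (hmatch : pat.isPrefixOf (List.drop p s))
    (hmin : ∀ i, start ≤ i → i < p → ¬ pat <+: List.drop i s) :
    (List.range (s.length + 1)).countP
        (fun j => decide (start ≤ j) && pat.isPrefixOf (List.drop j s))
      = (List.range (s.length + 1)).countP
          (fun j => decide (p + 1 ≤ j) && pat.isPrefixOf (List.drop j s)) + 1 := by
  have hsplit : List.range (s.length + 1)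
      = List.range (p + 1) ++ List.map (fun x => (p + 1) + x) (List.range (s.length - p)) := by
    rw [← List.range_add]
    congr 1
    omega
  rw [hsplit, List.countP_append, List.countP_append]
  have h1 : (List.range (p + 1)).countP
      (fun j => decide (start ≤ j) && pat.isPrefixOf (List.drop j s)) = 1 := by
    rw [List.range_succ, List.countP_append]
    have hz : (List.range p).countP
        (fun j => decide (start ≤ j) && pat.isPrefixOf (List.drop j s)) = 0 := by
      rw [List.countP_eq_zero]
      intro j hj
      simp only [List.mem_range] at hj
      simp only [Bool.and_eq_true, decide_eq_true_eq, not_and]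
      intro hsj hpre
      exact absurd (List.isPrefixOf_iff_prefix.mp hpre) (hmin j hsj hj)
    simp [hz, hsp, hmatch]
  have h2 : (List.range (p + 1)).countP
      (fun j => decide (p + 1 ≤ j) && pat.isPrefixOf (List.drop j s)) = 0 := by
    rw [List.countP_eq_zero]
    intro j hj
    simp only [List.mem_range] at hj
    simp [Nat.not_le.mpr hj]
  have h3 : (List.map (fun x => (p + 1) + x) (List.range (s.length - p))).countP
        (fun j => decide (start ≤ j) && pat.isPrefixOf (List.drop j s))
      = (List.map (fun x => (p + 1) + x) (List.range (s.length - p))).countP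
          (fun j => decide (p + 1 ≤ j) && pat.isPrefixOf (List.drop j s)) := by
    apply List.countP_congr
    intro x hx
    simp only [List.mem_map] at hx
    obtain ⟨k, _, rfl⟩ := hx
    have hb1 : start ≤ p + 1 + k := by omega
    have hb2 : p + 1 ≤ p + 1 + k := by omega
    simp [hb1, hb2]
  omega

lemma pvCountFind_spec_fuel (s pat : List Char) (hpat : pat ≠ []) :
    ∀ (n start : Nat) (total : Int), s.length + 1 - start ≤ n →
      pvCountFind s pat start total =
        total + ((List.range (s.length + 1)).countP
                  (fun j => decide (start ≤ j) && pat.isPrefixOf (List.drop j s)) : Int) := by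
  intro n
  induction n with
  | zero =>
    intro start total hn
    have hs : ¬ start ≤ s.length := by omega
    rw [pvCountFind, dif_neg hs]
    have hz : (List.range (s.length + 1)).countP
        (fun j => decide (start ≤ j) && pat.isPrefixOf (List.drop j s)) = 0 := by
      rw [List.countP_eq_zero]
      intro j hj
      simp only [List.mem_range] at hj
      have : ¬ start ≤ j := by omega
      simp [this]
    rw [hz]
    simp
  | succ n ih =>
    intro start total hn
    rw [pvCountFind]
    by_cases hs : start ≤ s.length
    · rw [dif_pos hs]
      by_cases h : PySem.Chars.findFrom s pat (start : Int) none = -1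
      · rw [dif_pos h]
        have hninf := (PySem.Chars.findFrom_natCast_eq_neg_one_iff s pat start hs).mp h
        have hz : (List.range (s.length + 1)).countP
            (fun j => decide (start ≤ j) && pat.isPrefixOf (List.drop j s)) = 0 := by
          rw [List.countP_eq_zero]
          intro j hj
          simp only [Bool.and_eq_true, decide_eq_true_eq, not_and]
          intro hsj hpre
          apply hninf
          have hdd : List.drop j s = List.drop (j - start) (List.drop start s) := by
            rw [List.drop_drop]
            congr 1
            omega
          have hp2 := List.isPrefixOf_iff_prefix.mp hpre
          rw [hdd] at hp2
          exact hp2.isInfix.trans (List.drop_suffix _ _).isInfix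
        rw [hz]
        simp
      · rw [dif_neg h]
        obtain ⟨hge, hpre, hmin⟩ := PySem.Chars.findFrom_natCast_spec s pat start hs h
        set pos := PySem.Chars.findFrom s pat (start : Int) none with hposdef
        have hlen := hpre.sublist.length_le
        simp only [List.length_drop] at hlen
        have hpatpos : 0 < pat.length := List.length_pos_of_ne_nil hpat
        have hple : pos.toNat ≤ s.length := by omega
        have hstartle : start ≤ pos.toNat := by omega
        rw [ih (pos.toNat + 1) (total + 1) (by omega)]
        rw [pv_count_split s pat start pos.toNat hple hstartle
          (List.isPrefixOf_iff_prefix.mpr hpre) hmin]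
        push_cast
        ring
    · rw [dif_neg hs]
      have hz : (List.range (s.length + 1)).countP
          (fun j => decide (start ≤ j) && pat.isPrefixOf (List.drop j s)) = 0 := by
        rw [List.countP_eq_zero]
        intro j hj
        simp only [List.mem_range] at hj
        have : ¬ start ≤ j := by omega
        simp [this]
      rw [hz]
      simp

lemma pvCountFind_zero (s pat : List Char) (hpat : pat ≠ []) (total : Int) :
    pvCountFind s pat 0 total = total + (pvCnt s pat : Int) := by
  rw [pvCountFind_spec_fuel s pat hpat (s.length + 1) 0 total (by omega)]
  unfold pvCnt
  rfl

lemma pvInnerA_spec (s posta posta2 : List Char) (L i : Int) :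
    ∀ (k ca : Nat) (contador : Int), (ca : Int) + k ≤ L →
      pvInnerA s posta posta2 L i (L - k) ca contador =
        contador + (if ((ca : Int) + k = L ∧ 0 < k ∧
            ∀ j < L.toNat, ca ≤ j →
              (PySem.List.pyGetD s (i + j) ' ' = PySem.List.pyGetD posta (j : Int) ' ' ∨
               PySem.List.pyGetD s (i + j) ' ' = PySem.List.pyGetD posta2 (j : Int) ' '))
          then 1 else 0) := by
  intro k
  induction k with
  | zero =>
    intro ca contador h
    rw [pvInnerA]
    rw [dif_neg (by simp)]
    simp
  | succ k ih =>
    intro ca contador h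
    have harg : L - ((k + 1 : Nat) : Int) + 1 = L - (k : Nat) := by push_cast; ring
    rw [pvInnerA, dif_pos (by push_cast; omega)]
    simp only []
    by_cases hok : (PySem.List.pyGetD s (i + (ca : Int)) ' ' = PySem.List.pyGetD posta (ca : Int) ' ' ∨
        PySem.List.pyGetD s (i + (ca : Int)) ' ' = PySem.List.pyGetD posta2 (ca : Int) ' ')
    · rw [if_pos hok]
      by_cases hfin : (ca : Int) + 1 = L
      · have hk0 : k = 0 := by omega
        subst hk0
        rw [if_pos hfin, harg]
        have ihe := ih (ca + 1) (contador + 1) (by push_cast; omega)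
        push_cast at ihe ⊢
        rw [ihe]
        rw [if_neg (by simp), if_pos ?_]
        · ring
        · refine ⟨hfin, trivial, ?_⟩
          intro j hj hcaj
          have hLt : L.toNat = ca + 1 := by omega
          have : j = ca := by omega
          subst this
          exact hok
      · rw [if_neg hfin, harg]
        have ihe := ih (ca + 1) contador (by push_cast; omega)
        push_cast at ihe ⊢
        rw [ihe]
        by_cases hL : (ca : Int) + ((k : Int) + 1) = L
        · have hkpos : 0 < k := by omega
          split_ifs with h1 h2 h3
          · rfl
          · exfalso
            obtain ⟨e1, -, hA⟩ := h1
            refine h2 ⟨by omega, by omega, fun j hj hc => ?_⟩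
            rcases Nat.eq_or_lt_of_le hc with heq | hlt
            · exact heq ▸ hok
            · exact hA j hj (by omega)
          · exfalso
            obtain ⟨e1, -, hA⟩ := h3
            exact h1 ⟨by omega, by omega, fun j hj hc => hA j hj (by omega)⟩
          · rfl
        · rw [if_neg (fun hc => hL (by have := hc.1; omega)),
              if_neg (fun hc => hL (by have := hc.1; omega))]
    · rw [if_neg hok]
      rw [if_neg (by push_cast at h; omega : ¬((ca : Int) = L)), harg]
      have ihe := ih ca contador (by push_cast at h ⊢; omega)
      push_cast at ihe ⊢
      rw [ihe]
      have hcaLt : ca < L.toNat := by push_cast at h; omega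
      rw [if_neg ?_, if_neg ?_]
      · rintro ⟨-, -, hall⟩
        exact hok (hall ca hcaLt le_rfl)
      · rintro ⟨-, -, hall⟩
        exact hok (hall ca hcaLt le_rfl)

lemma pv_prefix_iff_getD (s p : List Char) (k : Nat) (h : k + p.length ≤ s.length) :
    p <+: List.drop k s ↔ ∀ j < p.length, s.getD (k + j) ' ' = p.getD j ' ' := by
  rw [List.prefix_iff_eq_take]
  constructor
  · intro hp j hj
    have hkj : k + j < s.length := by omega
    rw [List.getD_eq_getElem _ _ hkj, List.getD_eq_getElem _ _ hj]
    have : p[j] = (List.take p.length (List.drop k s))[j]'(by simp; omega) := by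
      congr 1
    rw [this]
    simp [List.getElem_take, List.getElem_drop]
  · intro hall
    apply List.ext_getElem
    · simp
      omega
    · intro i h1 h2
      have hkj : k + i < s.length := by omega
      have := hall i h1
      rw [List.getD_eq_getElem _ _ hkj, List.getD_eq_getElem _ _ h1] at this
      simp only [List.getElem_take, List.getElem_drop]
      exact this.symm

lemma pv_pat_getD_lt (w : List Char) (x : Char) (j : Nat) (hj : j < w.length + 1) :
    (' ' :: (w ++ [x])).getD j ' ' = (' ' :: (w ++ [' '])).getD j ' ' := by
  cases j with
  | zero => simp
  | succ i =>
    rw [List.getD_cons_succ, List.getD_cons_succ,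
        List.getD_append _ _ _ i (by omega), List.getD_append _ _ _ i (by omega)]

lemma pv_pat_getD_last (w : List Char) (x : Char) :
    (' ' :: (w ++ [x])).getD (w.length + 1) ' ' = x := by
  rw [List.getD_cons_succ, List.getD_append_right _ _ _ _ (le_refl _)]
  simp

lemma pv_allOK_iff (s w : List Char) (k : Nat) (hk : k + (w.length + 2) ≤ s.length) :
    (∀ j < w.length + 2,
        (PySem.List.pyGetD s ((k : Int) + (j : Nat)) ' ' = PySem.List.pyGetD (' ' :: (w ++ [' '])) (j : Int) ' ' ∨
         PySem.List.pyGetD s ((k : Int) + (j : Nat)) ' ' = PySem.List.pyGetD (' ' :: (w ++ ['\n'])) (j : Int) ' '))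
    ↔ ((' ' :: (w ++ [' '])) <+: List.drop k s ∨ (' ' :: (w ++ ['\n'])) <+: List.drop k s) := by
  have hl1 : (' ' :: (w ++ [' '])).length = w.length + 2 := by simp
  have hl2 : (' ' :: (w ++ ['\n'])).length = w.length + 2 := by simp
  have hcast : ∀ j : Nat, ((k : Int) + (j : Nat)) = ((k + j : Nat) : Int) := by
    intro j; push_cast; ring
  constructor
  · intro hall
    have hall' : ∀ j < w.length + 2,
        s.getD (k + j) ' ' = (' ' :: (w ++ [' '])).getD j ' ' ∨
        s.getD (k + j) ' ' = (' ' :: (w ++ ['\n'])).getD j ' ' := by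
      intro j hj
      have := hall j hj
      rw [hcast j, PySem.List.pyGetD_natCast, PySem.List.pyGetD_natCast,
          PySem.List.pyGetD_natCast] at this
      exact this
    by_cases hsp : s.getD (k + (w.length + 1)) ' ' = ' '
    · left
      rw [pv_prefix_iff_getD s _ k (by rw [hl1]; omega)]
      intro j hj
      rw [hl1] at hj
      rcases Nat.lt_or_ge j (w.length + 1) with hlt | hge
      · rcases hall' j hj with h1 | h1
        · exact h1
        · rw [h1, pv_pat_getD_lt w '\n' j hlt, pv_pat_getD_lt w ' ' j hlt]
      · have hje : j = w.length + 1 := by omega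
        subst hje
        rw [hsp, pv_pat_getD_last]
    · right
      rw [pv_prefix_iff_getD s _ k (by rw [hl2]; omega)]
      intro j hj
      rw [hl2] at hj
      rcases Nat.lt_or_ge j (w.length + 1) with hlt | hge
      · rcases hall' j hj with h1 | h1
        · rw [h1, pv_pat_getD_lt w ' ' j hlt, pv_pat_getD_lt w '\n' j hlt]
        · exact h1
      · have hje : j = w.length + 1 := by omega
        subst hje
        rcases hall' (w.length + 1) (by omega) with h1 | h1
        · rw [pv_pat_getD_last] at h1
          exact absurd h1 hsp
        · exact h1
  · intro hor j hj
    rw [hcast j, PySem.List.pyGetD_natCast, PySem.List.pyGetD_natCast, PySem.List.pyGetD_natCast]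
    rcases hor with hp | hp
    · left
      exact (pv_prefix_iff_getD s _ k (by rw [hl1]; omega)).mp hp j (by rw [hl1]; omega)
    · right
      exact (pv_prefix_iff_getD s _ k (by rw [hl2]; omega)).mp hp j (by rw [hl2]; omega)

lemma pv_body_eq (s w : List Char) (k : Nat) (c : Int)
    (hk : k + (w.length + 2) ≤ s.length) :
    (if PySem.List.pyGetD s (k : Int) ' ' = ' ' then
       pvInnerA s (' ' :: (w ++ [' '])) (' ' :: (w ++ ['\n']))
         (((' ' :: (w ++ [' '])).length : Nat) : Int) (k : Int) 0 0 c
     else c)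
      = c + (if (' ' :: (w ++ [' '])).isPrefixOf (List.drop k s) ||
                (' ' :: (w ++ ['\n'])).isPrefixOf (List.drop k s) then 1 else 0) := by
  have hl1 : (' ' :: (w ++ [' '])).length = w.length + 2 := by simp
  have hspec := pvInnerA_spec s (' ' :: (w ++ [' '])) (' ' :: (w ++ ['\n']))
      (((' ' :: (w ++ [' '])).length : Nat) : Int) (k : Int) ((' ' :: (w ++ [' '])).length) 0 c
      (by simp)
  rw [sub_self] at hspec
  simp only [Nat.cast_zero, Nat.zero_le, true_implies, zero_add, Int.toNat_natCast, true_and] at hspec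
  rw [hspec]
  have hcond : (
      0 < (' ' :: (w ++ [' '])).length ∧
      ∀ j < (' ' :: (w ++ [' '])).length,
        (PySem.List.pyGetD s ((k : Int) + (j : Nat)) ' ' = PySem.List.pyGetD (' ' :: (w ++ [' '])) (j : Int) ' ' ∨
         PySem.List.pyGetD s ((k : Int) + (j : Nat)) ' ' = PySem.List.pyGetD (' ' :: (w ++ ['\n'])) (j : Int) ' '))
      ↔ ((' ' :: (w ++ [' '])) <+: List.drop k s ∨ (' ' :: (w ++ ['\n'])) <+: List.drop k s) := by
    rw [hl1]
    constructor
    · rintro ⟨-, hall⟩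
      exact (pv_allOK_iff s w k hk).mp hall
    · intro hor
      exact ⟨by omega, (pv_allOK_iff s w k hk).mpr hor⟩
  by_cases hor : ((' ' :: (w ++ [' '])) <+: List.drop k s ∨ (' ' :: (w ++ ['\n'])) <+: List.drop k s)
  · have hguard : PySem.List.pyGetD s (k : Int) ' ' = ' ' := by
      have h0 := (pv_allOK_iff s w k hk).mpr hor 0 (by omega)
      rw [show ((k : Int) + ((0 : Nat) : Int)) = (k : Int) by push_cast; ring] at h0
      simpa using h0
    rw [if_pos hguard, if_pos (hcond.mpr hor), if_pos]
    rw [Bool.or_eq_true, List.isPrefixOf_iff_prefix, List.isPrefixOf_iff_prefix]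
    exact hor
  · have hno : ¬((' ' :: (w ++ [' '])).isPrefixOf (List.drop k s) ||
        (' ' :: (w ++ ['\n'])).isPrefixOf (List.drop k s)) = true := by
      rw [Bool.or_eq_true, List.isPrefixOf_iff_prefix, List.isPrefixOf_iff_prefix]
      exact hor
    rw [if_neg hno]
    by_cases hguard : PySem.List.pyGetD s (k : Int) ' ' = ' '
    · rw [if_pos hguard, if_neg fun hc => hor (hcond.mp hc)]
    · rw [if_neg hguard]
      ring

lemma pv_countP_or_disjoint (l : List Nat) (p q : Nat → Bool)
    (h : ∀ x ∈ l, ¬(p x = true ∧ q x = true)) :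
    l.countP (fun x => p x || q x) = l.countP p + l.countP q := by
  induction l with
  | nil => simp
  | cons a l ih =>
    have ha := h a (List.mem_cons_self)
    have hl : ∀ x ∈ l, ¬(p x = true ∧ q x = true) := fun x hx => h x (List.mem_cons_of_mem a hx)
    rw [List.countP_cons, List.countP_cons, List.countP_cons, ih hl]
    cases hp : p a <;> cases hq : q a <;> simp_all <;> omega

lemma pv_countP_range_extend (A B : Nat) (p : Nat → Bool) (hAB : A ≤ B)
    (h : ∀ j, A ≤ j → p j = false) :
    (List.range B).countP p = (List.range A).countP p := by
  rw [show B = A + (B - A) by omega, List.range_add, List.countP_append]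
  have hz : (List.map (fun x => A + x) (List.range (B - A))).countP p = 0 := by
    rw [List.countP_eq_zero]
    intro j hj
    simp only [List.mem_map] at hj
    obtain ⟨x, -, rfl⟩ := hj
    simp [h (A + x) (by omega)]
  omega

lemma pv_loopA_eq (s w : List Char) :
    (PySem.List.pyRange 0 ((s.length : Int) - ((' ' :: (w ++ [' '])).length : Int) + 1) 1).foldl
      (fun contador i =>
        if PySem.List.pyGetD s i ' ' = PySem.List.pyGetD (' ' :: (w ++ [' '])) 0 ' ' then
          pvInnerA s (' ' :: (w ++ [' '])) (' ' :: (w ++ ['\n'])) ((' ' :: (w ++ [' '])).length : Int) i 0 0 contador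
        else contador)
      0
    = (pvCnt s (' ' :: (w ++ [' '])) : Int) + (pvCnt s (' ' :: (w ++ ['\n'])) : Int) := by
  rw [PySem.List.pyRange_one, List.foldl_map]
  rw [PySem.List.foldl_congr_mem _ _
      (fun (c : Int) (kk : Nat) => c + (if (' ' :: (w ++ [' '])).isPrefixOf (List.drop kk s) ||
          (' ' :: (w ++ ['\n'])).isPrefixOf (List.drop kk s) then 1 else 0)) 0 ?hbody]
  case hbody =>
    intro c kk hkk
    simp only [List.mem_range] at hkk
    have h1 : (kk : Int) < (s.length : Int) - ((' ' :: (w ++ [' '])).length : Int) + 1 - 0 :=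
      Int.lt_toNat.mp hkk
    have hkb : kk + (w.length + 2) ≤ s.length := by
      simp only [List.length_cons, List.length_append] at h1
      omega
    simp only [zero_add, PySem.List.pyGetD_zero_cons]
    exact pv_body_eq s w kk c hkb
  rw [PySem.List.foldl_add, zero_add, PySem.List.sum_map_ite_one_zero]
  have hext := pv_countP_range_extend
      (((s.length : Int) - ((' ' :: (w ++ [' '])).length : Int) + 1 - 0).toNat) (s.length + 1)
      (fun kk => (' ' :: (w ++ [' '])).isPrefixOf (List.drop kk s) ||
          (' ' :: (w ++ ['\n'])).isPrefixOf (List.drop kk s))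
      (by omega)
      (by
        intro j hj
        have hM := Int.self_le_toNat ((s.length : Int) - ((' ' :: (w ++ [' '])).length : Int) + 1 - 0)
        have e1 : (' ' :: (w ++ [' '])).length = w.length + 2 := by simp
        have hb : ∀ (x : Char), (' ' :: (w ++ [x])).isPrefixOf (List.drop j s) = false := by
          intro x
          apply Bool.eq_false_iff.mpr
          intro htrue
          have hp := List.isPrefixOf_iff_prefix.mp htrue
          have hlen := hp.sublist.length_le
          have e2 : (' ' :: (w ++ [x])).length = w.length + 2 := by simp
          simp only [List.length_drop] at hlen
          omega
        simp [hb])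
  rw [← hext]
  rw [pv_countP_or_disjoint _ _ _ ?hdisj]
  case hdisj =>
    rintro x - ⟨hp1, hp2⟩
    have q1 := List.isPrefixOf_iff_prefix.mp hp1
    have q2 := List.isPrefixOf_iff_prefix.mp hp2
    rw [List.prefix_iff_eq_take] at q1 q2
    have hL12 : (' ' :: (w ++ [' '])).length = (' ' :: (w ++ ['\n'])).length := by simp
    rw [hL12] at q1
    have heq := q1.trans q2.symm
    simp at heq
  unfold pvCnt
  push_cast
  ring

lemma pvSubstr_prefix (s : List Char) (m : Nat) (hm : m ≤ s.length) :
    pvSubstr s 0 (m : Int) = List.take m s := by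
  unfold pvSubstr
  rw [PySem.List.foldl_append_singleton_eq_map, List.nil_append, PySem.List.pyRange_one]
  rw [List.map_map]
  apply List.ext_getElem
  · simp
    omega
  · intro i h1 h2
    simp only [List.getElem_map, List.getElem_range, Function.comp_apply, List.getElem_take]
    have h0 : ((0 : Int) + (i : Nat)) = ((i : Nat) : Int) := by ring
    simp only [List.length_map, List.length_range] at h1
    rw [h0, PySem.List.pyGetD_natCast, List.getD_eq_getElem _ _ (by omega)]

lemma pvSubstr_suffix (s : List Char) (m : Nat) (hm : m ≤ s.length) :
    pvSubstr s ((s.length : Int) - (m : Int)) (s.length : Int) = List.drop (s.length - m) s := by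
  unfold pvSubstr
  rw [PySem.List.foldl_append_singleton_eq_map, List.nil_append]
  have hlen : (s.length : Int) = PySem.List.len s := by simp [PySem.List.len_eq]
  rw [show ((s.length : Int) - (m : Int)) = (((s.length - m : Nat)) : Int) by omega]
  conv_lhs => rw [hlen]
  rw [PySem.List.map_pyGetD_pyRange s ' ' (Int.natCast_nonneg _)]
  simp

lemma pv_foldl_flag {α : Type} (l : List α) (p : α → Prop) [DecidablePred p] (b : Bool) :
    l.foldl (fun e x => if p x then false else e) b = (b && l.all (fun x => !(decide (p x)))) := by
  induction l generalizing b with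
  | nil => simp
  | cons a l ih =>
    simp only [List.foldl_cons, List.all_cons, ih]
    by_cases hp : p a
    · simp [hp]
    · simp [hp]

lemma pvCoinciden_eq (s1 s2 : List Char) (h : s1.length = s2.length) :
    pvCoinciden s1 s2 = decide (s1 = s2) := by
  unfold pvCoinciden
  rw [PySem.List.pyRange_one, List.foldl_map, pv_foldl_flag]
  simp only [Bool.true_and, Int.sub_zero, Int.toNat_natCast]
  rw [Bool.eq_iff_iff]
  simp only [List.all_eq_true, List.mem_range, zero_add, PySem.List.pyGetD_natCast,
    Bool.not_eq_eq_eq_not, Bool.not_true, decide_eq_false_iff_not, ne_eq, not_not,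
    decide_eq_true_eq]
  constructor
  · intro hall
    apply List.ext_getElem h
    intro i h1 h2
    have := hall i h1
    rw [List.getD_eq_getElem _ _ h1, List.getD_eq_getElem _ _ h2] at this
    exact this
  · intro heq i _
    rw [heq]

-- ===== VERDICT (by name: the statement is the Claim_ definition above) =====
theorem cuantas_veces_aparece_un_string_spec : Claim_equal_cuantas_veces_aparece_un_string := by
  intro frase palabra hdom hpre
  unfold Pre_cuantas_veces_aparece_un_string at hpre
  unfold Spec_cuantas_veces_aparece_un_string
  unfold cuantas_veces_aparece_un_string cuantas_veces_aparece_un_string_alt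
  simp only []
  set s := frase.toList with hs
  set w := palabra.toList with hw
  rw [pv_loopA_eq s w]
  rw [pvSubstr_prefix s w.length hpre, pvSubstr_suffix s w.length hpre]
  rw [pvCoinciden_eq _ _ (by simp; omega)]
  rw [pvCoinciden_eq _ _ (by simp; omega)]
  rw [List.foldl_cons, List.foldl_cons, List.foldl_nil]
  rw [pvCountFind_zero s (' ' :: (w ++ [' '])) (by simp) 0]
  rw [pvCountFind_zero s (' ' :: (w ++ ['\n'])) (by simp)]
  have hsw : PySem.Chars.startswith s w = decide (List.take w.length s = w) := by
    rw [Bool.eq_iff_iff]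
    simp only [PySem.Chars.startswith, List.isPrefixOf_iff_prefix, List.prefix_iff_eq_take,
      decide_eq_true_eq]
    exact eq_comm
  have hew : PySem.Chars.endswith s w = decide (List.drop (s.length - w.length) s = w) := by
    rw [Bool.eq_iff_iff]
    simp only [PySem.Chars.endswith, List.isSuffixOf_iff_suffix, List.suffix_iff_eq_drop,
      decide_eq_true_eq]
    exact eq_comm
  rw [hsw, hew]
  split_ifs <;> ring
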